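-- pv_equiv track=rewrite | github.com/manman4/OEIS_02 | 293/293709/293709_01.py | make_n_triangular_grid_graph
-- ===== SOURCE A (Python) =====
-- def make_n_triangular_grid_graph(n):
--     s = 1
--     grids = []
--     for i in range(n + 1, 1, -1):
--         for j in range(i - 1):
--             a, b, c = s + j, s + j + 1, s + i + j
--             grids.extend([(a, b), (a, c), (b, c)])
--         s += i
--     return grids
-- ===== SOURCE B (Python) =====
-- def make_n_triangular_grid_graph(n):
--     # Node-centric single pass: walk node ids 1..T(n+1) once, tracking the
--     # current row's start and size, and let each NODE emit its incident
--     # forward edges (below-left, right, below-right) -- no per-triangle loop.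
--     m = n + 1
--     total = m * (m + 1) // 2 if m > 0 else 0
--     edges = []
--     s, size = 1, m
--     for u in range(1, total + 1):
--         if u == s + size:          # first node of the next row
--             s, size = s + size, size - 1
--         j = u - s
--         if size > 1:
--             if j > 0:
--                 edges.append((u, s + size + j - 1))   # below-left
--             if j < size - 1:
--                 edges.append((u, u + 1))              # right
--                 edges.append((u, s + size + j))       # below-right
--     return edges
-- ===== Notes on version B (the rewrite author's own statement) =====
-- stated objective: alternative
-- what changed: B replaces A's nested per-triangle loops by a single node-centric pass over the node ids 1..T(n+1) (count computed in closed form), tracking the current row's start and size in the accumulator and letting each node emit its own incident forward edges (below-left, right, below-right).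
import Mathlib
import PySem

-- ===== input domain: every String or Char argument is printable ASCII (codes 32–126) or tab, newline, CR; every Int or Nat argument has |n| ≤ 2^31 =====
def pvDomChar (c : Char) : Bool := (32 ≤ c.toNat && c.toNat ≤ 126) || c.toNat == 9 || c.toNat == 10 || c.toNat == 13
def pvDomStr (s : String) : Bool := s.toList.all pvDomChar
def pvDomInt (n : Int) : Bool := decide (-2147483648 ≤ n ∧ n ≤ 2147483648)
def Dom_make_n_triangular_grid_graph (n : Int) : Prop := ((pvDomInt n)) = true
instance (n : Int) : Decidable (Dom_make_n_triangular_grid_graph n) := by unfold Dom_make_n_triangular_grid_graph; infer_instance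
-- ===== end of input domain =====

-- B makes a single node-centric pass over the node ids 1..T(n+1), tracking the current
-- row's start and size and letting each node emit its incident forward edges, instead of
-- A's nested per-triangle loops (objective: alternative, same cost).

-- ===== PORT A =====
-- one iteration of A's outer loop: the inner `for j in range(i-1): grids.extend(...)`, then `s += i`
def pvAStep (st : Int × List (Int × Int)) (i : Int) : Int × List (Int × Int) :=
  (st.1 + i,
    (PySem.List.pyRange 0 (i - 1) 1).foldl
      (fun g j =>
        g ++ [(st.1 + j, st.1 + j + 1), (st.1 + j, st.1 + i + j), (st.1 + j + 1, st.1 + i + j)])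
      st.2)

def make_n_triangular_grid_graph (n : Int) : List (Int × Int) :=
  ((PySem.List.pyRange (n + 1) 1 (-1)).foldl pvAStep (1, [])).2

-- ===== PORT B =====
-- one iteration of B's node loop: maybe advance to the next row, then emit this node's edges
def pvBStep (st : Int × Int × List (Int × Int)) (u : Int) : Int × Int × List (Int × Int) :=
  let s := if u = st.1 + st.2.1 then st.1 + st.2.1 else st.1
  let size := if u = st.1 + st.2.1 then st.2.1 - 1 else st.2.1
  let j := u - s
  let es :=
    if 1 < size then
      let es1 := if 0 < j then st.2.2 ++ [(u, s + size + j - 1)] else st.2.2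
      if j < size - 1 then es1 ++ [(u, u + 1), (u, s + size + j)] else es1
    else st.2.2
  (s, size, es)

def make_n_triangular_grid_graph_alt (n : Int) : List (Int × Int) :=
  let m := n + 1
  let total := if 0 < m then PySem.Int.floordiv (m * (m + 1)) 2 else 0
  (((PySem.List.pyRange 1 (total + 1) 1).foldl pvBStep (1, m, [])).2.2)

-- ===== PRECONDITION & SPEC =====
def Spec_make_n_triangular_grid_graph (n : Int) (out : List (Int × Int)) : Prop := out = make_n_triangular_grid_graph_alt n
instance (n : Int) (out : List (Int × Int)) : Decidable (Spec_make_n_triangular_grid_graph n out) := by unfold Spec_make_n_triangular_grid_graph; infer_instance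

-- ===== CLAIM =====
def Claim_equal_make_n_triangular_grid_graph : Prop := ∀ (n : Int), Dom_make_n_triangular_grid_graph n → Spec_make_n_triangular_grid_graph n (make_n_triangular_grid_graph n)

-- ===== LEMMAS AND PROOFS =====

-- edges of the triangles whose apex-offset j runs over [j0, i-1), upper row of size i at s
def pvInnerFrom (s i j0 : Int) : List (Int × Int) :=
  (PySem.List.pyRange j0 (i - 1) 1).flatMap
    (fun j => [(s + j, s + j + 1), (s + j, s + i + j), (s + j + 1, s + i + j)])

def pvInner (s i : Int) : List (Int × Int) := pvInnerFrom s i 0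

-- all edges for rows of sizes k, k-1, …, 1 with the top row starting at s
def pvE : Int → Nat → List (Int × Int)
  | _, 0 => []
  | s, (k + 1) => pvInner s ((k : Int) + 1) ++ pvE (s + ((k : Int) + 1)) k

def pvTri : Nat → Nat
  | 0 => 0
  | k + 1 => (k + 1) + pvTri k

theorem pvAStep_eq (s i : Int) (g : List (Int × Int)) :
    pvAStep (s, g) i = (s + i, g ++ pvInner s i) := by
  unfold pvAStep pvInner pvInnerFrom
  rw [PySem.List.foldl_append_eq_flatMap]

theorem pvA_loop : ∀ (k : Nat) (s : Int) (g : List (Int × Int)),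
    ((PySem.List.pyRange (k : Int) 1 (-1)).foldl pvAStep (s, g)).2 = g ++ pvE s k := by
  intro k
  induction k using Nat.strong_induction_on with
  | _ k ih =>
    match k with
    | 0 => intro s g; rw [PySem.List.pyRange_neg_one_eq_nil (by norm_num)]; simp [pvE]
    | 1 =>
      intro s g; rw [PySem.List.pyRange_neg_one_eq_nil (by norm_num)]
      simp [pvE, pvInner, pvInnerFrom, PySem.List.pyRange_one_eq_nil]
    | (j + 2) =>
      intro s g
      rw [PySem.List.pyRange_neg_one_cons (by push_cast; omega)]
      have h1 : ((((j : Nat) + 2 : Nat) : Int) - 1) = (((j + 1 : Nat) : Int)) := by push_cast; ring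
      simp only [List.foldl_cons, pvAStep_eq, h1]
      rw [ih (j + 1) (by omega)]
      simp [pvE, List.append_assoc]
      ring_nf

theorem pvInnerFrom_cons (s i j : Int) (h : j < i - 1) :
    pvInnerFrom s i j
      = [(s + j, s + j + 1), (s + j, s + i + j), (s + j + 1, s + i + j)] ++ pvInnerFrom s i (j + 1) := by
  unfold pvInnerFrom
  rw [PySem.List.pyRange_one_cons (by omega)]
  simp

theorem pvBtail (s i : Int) : ∀ (r : Nat) (j : Int) (es : List (Int × Int)),
    1 ≤ j → i = j + (r : Int) + 1 →
    (PySem.List.pyRange (s + j) (s + i) 1).foldl pvBStep (s, i, es)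
      = (s, i, es ++ (s + j, s + i + j - 1) :: pvInnerFrom s i j) := by
  intro r
  induction r with
  | zero =>
    intro j es hj hi
    rw [show s + i = (s + j) + 1 by omega, PySem.List.pyRange_one_singleton]
    simp only [List.foldl_cons, List.foldl_nil, pvBStep]
    unfold pvInnerFrom
    rw [PySem.List.pyRange_one_eq_nil (by omega)]
    split_ifs <;> first
      | (exfalso; omega)
      | (simp <;> omega)
  | succ r ih =>
    intro j es hj hi
    rw [PySem.List.pyRange_one_cons (by omega)]
    simp only [List.foldl_cons]
    have hstep : pvBStep (s, i, es) (s + j)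
        = (s, i, es ++ [(s + j, s + i + j - 1), (s + j, s + j + 1), (s + j, s + i + j)]) := by
      simp only [pvBStep]
      split_ifs <;> first
        | (exfalso; omega)
        | (simp [List.append_assoc] <;> omega)
    rw [hstep, show s + j + 1 = s + (j + 1) by ring, ih (j + 1) _ (by omega) (by push_cast at hi ⊢; omega)]
    rw [pvInnerFrom_cons s i j (by push_cast at hi ⊢; omega)]
    simp [List.append_assoc]
    omega

theorem pvBrow (s i : Int) (es : List (Int × Int)) (hi : 1 ≤ i) :
    (PySem.List.pyRange s (s + i) 1).foldl pvBStep (s, i, es) = (s, i, es ++ pvInner s i) := by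
  rcases eq_or_lt_of_le hi with h1 | h2
  · rw [show s + i = s + 1 by omega, PySem.List.pyRange_one_singleton]
    simp only [List.foldl_cons, List.foldl_nil, pvBStep]
    unfold pvInner pvInnerFrom
    rw [PySem.List.pyRange_one_eq_nil (by omega)]
    split_ifs <;> first | (exfalso; omega) | simp
  · rw [PySem.List.pyRange_one_cons (by omega)]
    simp only [List.foldl_cons]
    have hstep : pvBStep (s, i, es) s = (s, i, es ++ [(s, s + 1), (s, s + i)]) := by
      simp only [pvBStep]
      split_ifs <;> first | (exfalso; omega) | simp
    rw [hstep, show s + 1 = s + (1:Int) by ring,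
        pvBtail s i (i - 2).toNat 1 _ (by omega) (by omega)]
    unfold pvInner
    rw [pvInnerFrom_cons s i 0 (by omega)]
    simp [List.append_assoc]

theorem pvBStep_enter (s i : Int) (es : List (Int × Int)) (hi : 2 ≤ i) :
    pvBStep (s, i, es) (s + i) = pvBStep (s + i, i - 1, es) (s + i) := by
  simp only [pvBStep]
  split_ifs <;> first | rfl | (exfalso; omega)

theorem pvTri_two_mul : ∀ k : Nat, 2 * (pvTri k : Int) = (k : Int) * ((k : Int) + 1) := by
  intro k
  induction k with
  | zero => simp [pvTri]
  | succ j ih =>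
    have e : pvTri (j + 1) = (j + 1) + pvTri j := rfl
    rw [e]; push_cast; linear_combination ih

theorem pvBmain : ∀ (k : Nat) (s : Int) (es : List (Int × Int)),
    ((PySem.List.pyRange s (s + (pvTri k : Int)) 1).foldl pvBStep (s, (k : Int), es)).2.2
      = es ++ pvE s k := by
  intro k
  induction k with
  | zero =>
    intro s es
    rw [show (pvTri 0 : Int) = 0 by simp [pvTri], PySem.List.pyRange_one_eq_nil (by omega)]
    simp [pvE]
  | succ j ih =>
    intro s es
    have htri : (pvTri (j + 1) : Int) = ((j : Int) + 1) + (pvTri j : Int) := by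
      rw [show pvTri (j + 1) = (j + 1) + pvTri j from rfl]; push_cast; ring
    rw [htri, PySem.List.pyRange_one_append s (s + ((j : Int) + 1)) _ (by omega)
          (by have := pvTri_two_mul j; omega)]
    rw [show (((j + 1 : Nat)) : Int) = (j : Int) + 1 from by push_cast; ring]
    rw [List.foldl_append, pvBrow s ((j : Int) + 1) es (by omega)]
    rcases Nat.eq_zero_or_pos j with hj | hj
    · subst hj
      rw [PySem.List.pyRange_one_eq_nil (by rw [show pvTri 0 = 0 from rfl]; omega)]
      simp [pvE, pvInner, pvInnerFrom, PySem.List.pyRange_one_eq_nil]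
    · have hpos : 1 ≤ pvTri j := by
        cases j with
        | zero => omega
        | succ t => have e : pvTri (t + 1) = (t + 1) + pvTri t := rfl; omega
      rw [show s + ((j : Int) + 1 + (pvTri j : Int))
            = (s + ((j : Int) + 1)) + (pvTri j : Int) by ring]
      rw [PySem.List.pyRange_one_cons (by omega)]
      simp only [List.foldl_cons]
      rw [show pvBStep (s, (j : Int) + 1, es ++ pvInner s ((j : Int) + 1)) (s + ((j : Int) + 1))
            = pvBStep (s + ((j : Int) + 1), (j : Int), es ++ pvInner s ((j : Int) + 1)) (s + ((j : Int) + 1)) by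
          have h := pvBStep_enter s ((j : Int) + 1) (es ++ pvInner s ((j : Int) + 1)) (by omega)
          simpa using h]
      rw [← List.foldl_cons, ← PySem.List.pyRange_one_cons (by omega)]
      rw [ih (s + ((j : Int) + 1)) (es ++ pvInner s ((j : Int) + 1))]
      simp only [pvE]
      simp [List.append_assoc]

-- ===== VERDICT =====
theorem make_n_triangular_grid_graph_spec : Claim_equal_make_n_triangular_grid_graph := by
  intro n _
  unfold Spec_make_n_triangular_grid_graph make_n_triangular_grid_graph make_n_triangular_grid_graph_alt
  by_cases h : 0 < n + 1
  · obtain ⟨k, hk⟩ : ∃ k : Nat, n + 1 = (k : Int) := ⟨(n + 1).toNat, by omega⟩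
    simp only []
    rw [if_pos h, hk]
    have htot : PySem.Int.floordiv ((k : Int) * ((k : Int) + 1)) 2 = (pvTri k : Int) := by
      rw [PySem.Int.floordiv_eq_ediv_of_pos (by norm_num)]
      have h2 := pvTri_two_mul k
      omega
    rw [htot, show (pvTri k : Int) + 1 = 1 + (pvTri k : Int) by ring]
    rw [pvA_loop k 1 [], pvBmain k 1 []]
  · rw [PySem.List.pyRange_neg_one_eq_nil (by omega)]
    simp only []
    rw [if_neg h, PySem.List.pyRange_one_eq_nil (by omega)]
    simp
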